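-- pv_equiv track=rewrite | github.com/StarsExpress/LeetCode-Repository | dp_tabulation/target_array_transition.py | calculate_min_transition
-- ===== SOURCE A (Python) =====
-- def calculate_min_transition(numbers: list[int], targets: list[int]) -> int:  # LeetCode Q.3229.
--     min_operations = 0
--
--     positive_stack, positive_cushion = [], 0  # Difference decreasing monotonic stack.
--     negative_stack, negative_cushion = [], 0  # Difference increasing monotonic stack.
--
--     for target, number in zip(targets, numbers):
--         difference = target - number
--         if positive_stack:
--             if difference <= 0 or difference > positive_stack[-1]:  # Reset positive stack.
--                 min_operations += positive_stack[0] - positive_cushion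
--
--                 positive_cushion = 0 if difference <= 0 else positive_stack[-1]
--
--                 positive_stack.clear()
--
--         if negative_stack:
--             if difference >= 0 or difference < negative_stack[-1]:  # Reset negative stack.
--                 min_operations += negative_cushion - negative_stack[0]
--
--                 negative_cushion = 0 if difference >= 0 else negative_stack[-1]
--
--                 negative_stack.clear()
--
--         if difference > 0:
--             positive_stack.append(difference)
--
--         if difference < 0:
--             negative_stack.append(difference)
--
--     if positive_stack:  # Last difference might be in positive stack.
--         min_operations += positive_stack[0] - positive_cushion
--
--     if negative_stack:  # Last difference might be in negative stack.
--         min_operations += negative_cushion - negative_stack[0]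
--
--     return min_operations
-- ===== SOURCE B (Python) =====
-- def calculate_min_transition(numbers: list[int], targets: list[int]) -> int:
--     total = 0
--     prev = 0
--     for target, number in zip(targets, numbers):
--         diff = target - number
--         if prev * diff > 0:
--             total += max(0, abs(diff) - abs(prev))
--         else:
--             total += abs(diff)
--         prev = diff
--     return total
-- ===== Notes on version B (the rewrite author's own statement) =====
-- stated objective: simpler
-- what changed: Replaced the two monotonic stacks with cushion bookkeeping by a single pass keeping only a running total and the previous difference, adding max(0, |d|-|prev|) within a same-sign run and |d| otherwise.
import Mathlib
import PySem

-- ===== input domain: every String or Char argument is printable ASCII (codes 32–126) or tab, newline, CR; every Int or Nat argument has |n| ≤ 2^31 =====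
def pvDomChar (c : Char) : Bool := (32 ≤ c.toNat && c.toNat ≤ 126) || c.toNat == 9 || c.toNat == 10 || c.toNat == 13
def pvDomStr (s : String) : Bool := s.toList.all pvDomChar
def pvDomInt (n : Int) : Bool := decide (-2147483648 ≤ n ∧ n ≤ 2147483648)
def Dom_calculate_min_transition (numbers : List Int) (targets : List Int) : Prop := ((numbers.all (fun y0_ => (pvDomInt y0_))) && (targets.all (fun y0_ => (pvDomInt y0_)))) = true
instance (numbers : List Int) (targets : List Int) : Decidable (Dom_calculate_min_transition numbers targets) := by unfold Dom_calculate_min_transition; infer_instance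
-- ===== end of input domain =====

-- B replaces A's two monotonic stacks and cushion variables by one running total and the
-- previous difference (objective: simpler, same O(n) cost).

-- ===== PORT A =====
-- Loop body of A, one iteration over (target, number); state = (min_operations,
-- positive_stack, positive_cushion, negative_stack, negative_cushion).
-- Python's stack[0]/stack[-1] are read only under the nonemptiness guard, so headD/getLastD
-- with default 0 is exact there.
def pvStepA (s : Int × List Int × Int × List Int × Int) (tn : Int × Int) :
    Int × List Int × Int × List Int × Int :=
  let (m, ps, pc, ns, nc) := s
  let d := tn.1 - tn.2
  -- reset of the positive stack
  let m1 := if ps ≠ [] ∧ (d ≤ 0 ∨ ps.getLastD 0 < d) then m + ps.headD 0 - pc else m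
  let pc1 := if ps ≠ [] ∧ (d ≤ 0 ∨ ps.getLastD 0 < d) then
      (if d ≤ 0 then (0 : Int) else ps.getLastD 0) else pc
  let ps1 : List Int := if ps ≠ [] ∧ (d ≤ 0 ∨ ps.getLastD 0 < d) then [] else ps
  -- reset of the negative stack
  let m2 := if ns ≠ [] ∧ (0 ≤ d ∨ d < ns.getLastD 0) then m1 + nc - ns.headD 0 else m1
  let nc1 := if ns ≠ [] ∧ (0 ≤ d ∨ d < ns.getLastD 0) then
      (if 0 ≤ d then (0 : Int) else ns.getLastD 0) else nc
  let ns1 : List Int := if ns ≠ [] ∧ (0 ≤ d ∨ d < ns.getLastD 0) then [] else ns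
  -- pushes
  let ps2 := if 0 < d then ps1 ++ [d] else ps1
  let ns2 := if d < 0 then ns1 ++ [d] else ns1
  (m2, ps2, pc1, ns2, nc1)

def calculate_min_transition (numbers : List Int) (targets : List Int) : Int :=
  let st := (List.zip targets numbers).foldl pvStepA (0, [], 0, [], 0)
  let (m, ps, pc, ns, nc) := st
  (m + (if ps ≠ [] then ps.headD 0 - pc else 0)) + (if ns ≠ [] then nc - ns.headD 0 else 0)

-- ===== PORT B =====
-- Loop body of B; state = (total, prev).
def pvStepB (s : Int × Int) (tn : Int × Int) : Int × Int :=
  let d := tn.1 - tn.2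
  (s.1 + (if s.2 * d > 0 then max 0 (|d| - |s.2|) else |d|), d)

def calculate_min_transition_alt (numbers : List Int) (targets : List Int) : Int :=
  ((List.zip targets numbers).foldl pvStepB (0, 0)).1

-- ===== PRECONDITION & SPEC =====
def Spec_calculate_min_transition (numbers : List Int) (targets : List Int) (out : Int) : Prop := out = calculate_min_transition_alt numbers targets
instance (numbers : List Int) (targets : List Int) (out : Int) : Decidable (Spec_calculate_min_transition numbers targets out) := by unfold Spec_calculate_min_transition; infer_instance

-- ===== CLAIM (what is proved, stated in full; the proofs are below) =====
def Claim_equal_calculate_min_transition : Prop := ∀ (numbers : List Int) (targets : List Int), Dom_calculate_min_transition numbers targets → Spec_calculate_min_transition numbers targets (calculate_min_transition numbers targets)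

-- ===== LEMMAS AND PROOFS =====

-- Invariant relating A's loop state to B's (total, prev): prev is the last difference,
-- it sits at the top of the corresponding stack, the opposite stack is empty, the cushion of
-- an empty stack is 0, and A's accumulator plus its pending flush equals B's total.
def pvInv (sa : Int × List Int × Int × List Int × Int) (sb : Int × Int) : Prop :=
  let (m, ps, pc, ns, nc) := sa
  let (t, p) := sb
  (ps = [] → pc = 0) ∧ (ns = [] → nc = 0) ∧
  (if 0 < p then ns = [] ∧ ps ≠ [] ∧ ps.getLastD 0 = p ∧ m + ps.headD 0 - pc = t
   else if p < 0 then ps = [] ∧ ns ≠ [] ∧ ns.getLastD 0 = p ∧ m + nc - ns.headD 0 = t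
   else ps = [] ∧ ns = [] ∧ m = t)

lemma pvInv_step (sa : Int × List Int × Int × List Int × Int) (sb : Int × Int)
    (tn : Int × Int) (h : pvInv sa sb) : pvInv (pvStepA sa tn) (pvStepB sb tn) := by
  obtain ⟨m, ps, pc, ns, nc⟩ := sa
  obtain ⟨t, p⟩ := sb
  obtain ⟨tg, nb⟩ := tn
  simp only [pvInv] at h ⊢
  obtain ⟨hpc, hnc, h⟩ := h
  simp only [pvStepA, pvStepB]
  simp only [List.headD_eq_head?_getD, List.getLastD_eq_getLast?] at h ⊢
  rcases lt_trichotomy 0 p with hp | hp | hp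
  · rw [if_pos hp] at h
    obtain ⟨rfl, hps, hlast, hm⟩ := h
    obtain rfl := hnc rfl
    rcases lt_trichotomy 0 (tg - nb) with hd | hd | hd
    · have hd1 : nb < tg := by omega
      have hd2 : ¬ tg < nb := by omega
      have hmul : p * (tg - nb) > 0 := mul_pos hp hd
      by_cases hbig : ps.getLast?.getD 0 < tg - nb
      · -- reset positive stack, then push [tg - nb]
        have hc1 : ps ≠ [] ∧ (tg - nb ≤ 0 ∨ ps.getLast?.getD 0 < tg - nb) := ⟨hps, Or.inr hbig⟩
        rw [if_pos hc1, if_pos hc1, if_pos hc1]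
        simp [hd1, hd.not_gt, not_le.mpr hd, hmul, abs_of_pos hd, abs_of_pos hp, hlast]
        omega
      · -- run continues: push onto the positive stack
        have hc1 : ¬(ps ≠ [] ∧ (tg - nb ≤ 0 ∨ ps.getLast?.getD 0 < tg - nb)) := by
          intro hc
          rcases hc.2 with h1 | h1
          · omega
          · exact hbig h1
        rw [if_neg hc1, if_neg hc1, if_neg hc1]
        have hmax : max 0 (|tg - nb| - |p|) = 0 := by
          rw [abs_of_pos hd, abs_of_pos hp]; omega
        simp [hd1, hmul, hmax]
        cases ps with
        | nil => exact absurd rfl hps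
        | cons a l => exact ⟨by omega, by simpa using hm⟩
    · -- difference is zero: reset positive stack, both ending stacks empty
      have hc1 : ps ≠ [] ∧ (tg - nb ≤ 0 ∨ ps.getLast?.getD 0 < tg - nb) := ⟨hps, Or.inl hd.ge⟩
      rw [if_pos hc1, if_pos hc1, if_pos hc1]
      have heq : tg = nb := by omega
      subst heq
      simp []
      omega
    · -- difference negative: reset positive stack, push onto empty negative stack
      have hd1 : tg < nb := by omega
      have hd2 : ¬ nb < tg := by omega
      have hc1 : ps ≠ [] ∧ (tg - nb ≤ 0 ∨ ps.getLast?.getD 0 < tg - nb) := ⟨hps, Or.inl hd.le⟩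
      rw [if_pos hc1, if_pos hc1, if_pos hc1]
      have hmul : ¬ p * (tg - nb) > 0 := by
        simp only [gt_iff_lt, mul_pos_iff, not_or, not_and]
        constructor
        · intro _; omega
        · intro h1; omega
      simp [hd, hd2, hd.le, hmul, abs_of_neg hd]
      omega
  · -- previous difference was zero (or start): both stacks empty
    rw [if_neg (by omega), if_neg (by omega)] at h
    obtain ⟨rfl, rfl, hm⟩ := h
    obtain rfl := hpc rfl
    obtain rfl := hnc rfl
    rcases lt_trichotomy 0 (tg - nb) with hd | hd | hd
    · have hd1 : nb < tg := by omega
      have hd2 : ¬ tg < nb := by omega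
      simp [hd1, hd.not_gt, ← hp, abs_of_pos hd]
      omega
    · have heq : tg = nb := by omega
      subst heq
      simp [← hp, hm]
    · have hd1 : tg < nb := by omega
      have hd2 : ¬ nb < tg := by omega
      simp [hd, hd2, ← hp, abs_of_neg hd]
      omega
  · rw [if_neg hp.not_gt, if_pos hp] at h
    obtain ⟨rfl, hns, hlast, hm⟩ := h
    obtain rfl := hpc rfl
    rcases lt_trichotomy 0 (tg - nb) with hd | hd | hd
    · -- difference positive: reset negative stack, push onto empty positive stack
      have hd1 : nb < tg := by omega
      have hd2 : ¬ tg < nb := by omega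
      have hc2 : ns ≠ [] ∧ (0 ≤ tg - nb ∨ tg - nb < ns.getLast?.getD 0) := ⟨hns, Or.inl hd.le⟩
      rw [if_pos hc2, if_pos hc2, if_pos hc2]
      have hmul : ¬ p * (tg - nb) > 0 := by
        simp only [gt_iff_lt, mul_pos_iff, not_or, not_and]
        constructor
        · intro h1; omega
        · intro _; omega
      simp [hd1, hd2, hd.not_gt, hmul, abs_of_pos hd]
      omega
    · -- difference is zero: reset negative stack, both ending stacks empty
      have hc2 : ns ≠ [] ∧ (0 ≤ tg - nb ∨ tg - nb < ns.getLast?.getD 0) := ⟨hns, Or.inl hd.le⟩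
      rw [if_pos hc2, if_pos hc2, if_pos hc2]
      have heq : tg = nb := by omega
      subst heq
      simp []
      omega
    · have hd1 : tg < nb := by omega
      have hd2 : ¬ nb < tg := by omega
      have hmul : p * (tg - nb) > 0 := mul_pos_of_neg_of_neg hp hd
      by_cases hsmall : tg - nb < ns.getLast?.getD 0
      · -- reset negative stack, then push [tg - nb]
        have hc2 : ns ≠ [] ∧ (0 ≤ tg - nb ∨ tg - nb < ns.getLast?.getD 0) := ⟨hns, Or.inr hsmall⟩
        rw [if_pos hc2, if_pos hc2, if_pos hc2]
        simp [hd, hd1, hd2, hmul, abs_of_neg hd, abs_of_neg hp, hlast]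
        omega
      · -- run continues: push onto the negative stack
        have hc2 : ¬(ns ≠ [] ∧ (0 ≤ tg - nb ∨ tg - nb < ns.getLast?.getD 0)) := by
          intro hc
          rcases hc.2 with h1 | h1
          · omega
          · exact hsmall h1
        rw [if_neg hc2, if_neg hc2, if_neg hc2]
        have hmax : max 0 (|tg - nb| - |p|) = 0 := by
          rw [abs_of_neg hd, abs_of_neg hp]; omega
        simp [hd1, hd2, hmul, hmax]
        cases ns with
        | nil => exact absurd rfl hns
        | cons a l => simpa using hm

lemma pvInv_fold (l : List (Int × Int)) (sa : Int × List Int × Int × List Int × Int)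
    (sb : Int × Int) (h : pvInv sa sb) : pvInv (l.foldl pvStepA sa) (l.foldl pvStepB sb) := by
  induction l generalizing sa sb with
  | nil => exact h
  | cons x xs ih => exact ih _ _ (pvInv_step _ _ _ h)

-- ===== VERDICT (by name: the statement is the Claim_ definition above) =====
theorem calculate_min_transition_spec : Claim_equal_calculate_min_transition := by
  intro numbers targets _
  unfold Spec_calculate_min_transition calculate_min_transition calculate_min_transition_alt
  have h := pvInv_fold (List.zip targets numbers) (0, [], 0, [], 0) (0, 0)
    (by simp [pvInv])
  generalize hA : (List.zip targets numbers).foldl pvStepA (0, [], 0, [], 0) = sa at h ⊢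
  generalize hB : (List.zip targets numbers).foldl pvStepB (0, 0) = sb at h ⊢
  obtain ⟨m, ps, pc, ns, nc⟩ := sa
  obtain ⟨t, p⟩ := sb
  simp only [pvInv] at h
  obtain ⟨hpc, hnc, h⟩ := h
  split_ifs at h with h1 h2
  · obtain ⟨hns, hps, _, hm⟩ := h
    rw [List.headD_eq_head?_getD] at hm
    simp [hps, hns]
    omega
  · obtain ⟨hps, hns, _, hm⟩ := h
    rw [List.headD_eq_head?_getD] at hm
    simp [hps, hns]
    omega
  · obtain ⟨hps, hns, hm⟩ := h
    simp [hps, hns, hm]
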